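-- pv_equiv track=rewrite | github.com/vchernoy/coding | contests/2017/google_code_jam_2017/qualification/tidy_numbers/tidy_numbers.py | gen_all
-- ===== SOURCE A (Python) =====
-- def gen_all(n):
--     res = []
--     for i in range(1, n+1):
--         k = i
--         d = 9
--         ok = True
--         while ok and (k > 0):
--             d0 = k % 10
--             ok = d0 <= d
--             d = d0
--             k //= 10
--
--         if ok:
--             res.append(i)
--
--     return res
-- ===== SOURCE B (Python) =====
-- def gen_all(n):
--     # Enumerate non-decreasing digit strings directly, length by length
--     # (within a fixed length, lexicographic DFS order is numeric order).
--     def gen(prefix, lo, rem):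
--         if rem < 1:
--             return [prefix] if prefix <= n else []
--         out = []
--         for d in range(lo, 10):
--             out += gen(prefix * 10 + d, d, rem - 1)
--         return out
--
--     nd = 0
--     t = n
--     while t > 0:
--         t //= 10
--         nd += 1
--
--     res = []
--     for length in range(1, nd + 1):
--         res += gen(0, 1, length)
--     return res
-- ===== Notes on version B (the rewrite author's own statement) =====
-- stated objective: faster
-- what changed: Instead of testing every integer 1..n with a digit-stripping loop, B enumerates the non-decreasing digit strings directly (DFS over digits, length by length), emitting them already in increasing order.
import Mathlib
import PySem

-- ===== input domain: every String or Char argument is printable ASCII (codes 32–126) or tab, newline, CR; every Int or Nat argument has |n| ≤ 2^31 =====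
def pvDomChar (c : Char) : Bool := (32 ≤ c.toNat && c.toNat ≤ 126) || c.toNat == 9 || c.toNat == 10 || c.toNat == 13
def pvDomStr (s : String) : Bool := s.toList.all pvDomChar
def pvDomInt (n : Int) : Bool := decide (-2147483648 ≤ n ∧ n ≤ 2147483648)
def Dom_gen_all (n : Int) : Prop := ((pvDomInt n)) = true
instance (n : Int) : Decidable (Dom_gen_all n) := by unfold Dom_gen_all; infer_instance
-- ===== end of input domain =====

-- B replaces A's scan of every integer 1..n by a direct DFS enumeration of the
-- non-decreasing digit strings, length by length (objective: faster, asymptotically).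

-- ===== PORT A =====
-- the inner `while ok and (k > 0)` loop of A
def gen_all_check (k d : Int) (ok : Bool) : Bool :=
  if h : ok = true ∧ 0 < k then
    gen_all_check (PySem.Int.floordiv k 10) (PySem.Int.mod k 10)
      (decide (PySem.Int.mod k 10 ≤ d))
  else ok
termination_by k.toNat
decreasing_by
  have h1 : PySem.Int.floordiv k 10 = k / 10 :=
    PySem.Int.floordiv_eq_ediv_of_pos (by norm_num)
  have h2 := h.2
  omega

def gen_all (n : Int) : List Int :=
  (PySem.List.pyRange 1 (n + 1) 1).foldl
    (fun res i => if gen_all_check i 9 true then res ++ [i] else res) []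

-- ===== PORT B =====
-- helper gen(prefix, lo, rem) of Source B
def gen_all_gen (n p lo rem : Int) : List Int :=
  if rem < 1 then (if p ≤ n then [p] else [])
  else
    (PySem.List.pyRange lo 10 1).foldl
      (fun out d => out ++ gen_all_gen n (p * 10 + d) d (rem - 1)) []
termination_by rem.toNat
decreasing_by omega

-- the `while t > 0: t //= 10; nd += 1` loop of Source B
def gen_all_nd (t : Int) : Int :=
  if h : 0 < t then gen_all_nd (PySem.Int.floordiv t 10) + 1 else 0
termination_by t.toNat
decreasing_by
  have h1 : PySem.Int.floordiv t 10 = t / 10 :=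
    PySem.Int.floordiv_eq_ediv_of_pos (by norm_num)
  omega

def gen_all_alt (n : Int) : List Int :=
  (PySem.List.pyRange 1 (gen_all_nd n + 1) 1).foldl
    (fun res len => res ++ gen_all_gen n 0 1 len) []

-- ===== PRECONDITION & SPEC =====
def Spec_gen_all (n : Int) (out : List Int) : Prop := out = gen_all_alt n
instance (n : Int) (out : List Int) : Decidable (Spec_gen_all n out) := by unfold Spec_gen_all; infer_instance

-- ===== CLAIM (what is proved, stated in full; the proofs are below) =====
def Claim_equal_gen_all : Prop := ∀ (n : Int), Dom_gen_all n → Spec_gen_all n (gen_all n)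

-- ===== LEMMAS AND PROOFS =====

-- `v` consists of prefix `p` followed by `rem` more digits, each in [lo,10) resp. ≥ its predecessor
def pvExt (rem : Nat) (p lo v : Int) : Prop :=
  match rem with
  | 0 => v = p
  | r + 1 => ∃ d, lo ≤ d ∧ d < 10 ∧ pvExt r (p * 10 + d) d v

-- PySem floordiv/mod agree with Int ediv/emod for the positive divisor 10
theorem pvFd (k : Int) : PySem.Int.floordiv k 10 = k / 10 :=
  PySem.Int.floordiv_eq_ediv_of_pos (by norm_num)
theorem pvMd (k : Int) : PySem.Int.mod k 10 = k % 10 :=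
  PySem.Int.mod_eq_emod_of_pos (by norm_num)

theorem pvCheck_false (k d : Int) : gen_all_check k d false = false := by
  unfold gen_all_check; simp

theorem pvCheck_unfold_pos (k c : Int) (hk : 0 < k) :
    gen_all_check k c true =
      (decide (k % 10 ≤ c) && gen_all_check (k / 10) (k % 10) true) := by
  conv_lhs => rw [gen_all_check]
  rw [dif_pos ⟨rfl, hk⟩, pvFd, pvMd]
  by_cases h : k % 10 ≤ c
  · simp [h]
  · simp [h, pvCheck_false]

theorem pvCheck_zero (c : Int) : gen_all_check 0 c true = true := by
  unfold gen_all_check; simp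

theorem pvCheck_cap (k c : Int) (hk : 0 < k) :
    gen_all_check k c true =
      (decide (k % 10 ≤ c) && gen_all_check k 9 true) := by
  rw [pvCheck_unfold_pos k c hk, pvCheck_unfold_pos k 9 hk]
  have h9 : k % 10 ≤ 9 := by omega
  simp [h9]

theorem pvGen_mem (n : Int) (r : Nat) :
    ∀ (p lo v : Int), v ∈ gen_all_gen n p lo (r : Int) ↔ (v ≤ n ∧ pvExt r p lo v) := by
  induction r with
  | zero =>
    intro p lo v
    rw [gen_all_gen]
    simp only [show ((0 : Nat) : Int) < 1 by norm_num, if_true, pvExt]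
    split_ifs with h <;> simp <;> omega
  | succ r ih =>
    intro p lo v
    rw [gen_all_gen]
    have hlt : ¬ ((r + 1 : Nat) : Int) < 1 := by push_cast; omega
    rw [if_neg hlt]
    rw [PySem.List.foldl_append_eq_flatMap]
    have hcast : ((r + 1 : Nat) : Int) - 1 = (r : Int) := by push_cast; ring
    simp only [hcast, List.nil_append, List.mem_flatMap, PySem.List.mem_pyRange_one, pvExt]
    constructor
    · rintro ⟨d, ⟨hd1, hd2⟩, hv⟩
      rw [ih] at hv
      exact ⟨hv.1, d, hd1, hd2, hv.2⟩
    · rintro ⟨hvn, d, hd1, hd2, he⟩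
      exact ⟨d, ⟨hd1, hd2⟩, (ih _ _ _).mpr ⟨hvn, he⟩⟩

theorem pvExt_bounds (r : Nat) :
    ∀ (p lo v : Int), 0 ≤ p → 0 ≤ lo → pvExt r p lo v →
      p * 10 ^ r ≤ v ∧ v < (p + 1) * 10 ^ r := by
  induction r with
  | zero => intro p lo v hp hlo h; simp [pvExt] at h; subst h; simp
  | succ r ih =>
    rintro p lo v hp hlo ⟨d, hd1, hd2, he⟩
    have hd0 : 0 ≤ d := le_trans hlo hd1
    have := ih (p * 10 + d) d v (by positivity) hd0 he
    have hpow : (0:Int) < 10 ^ r := by positivity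
    constructor
    · calc p * 10 ^ (r + 1) = (p * 10) * 10 ^ r := by ring
        _ ≤ (p * 10 + d) * 10 ^ r := by nlinarith
        _ ≤ v := this.1
    · calc v < (p * 10 + d + 1) * 10 ^ r := this.2
        _ ≤ ((p + 1) * 10) * 10 ^ r := by nlinarith
        _ = (p + 1) * 10 ^ (r + 1) := by ring

theorem pvExt_lb (r : Nat) (p lo v : Int) (hp : 0 ≤ p) (hlo : 1 ≤ lo)
    (h : pvExt (r + 1) p lo v) : p * 10 ^ (r + 1) + 10 ^ r ≤ v := by
  obtain ⟨d, hd1, hd2, he⟩ := h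
  have hd1' : 1 ≤ d := le_trans hlo hd1
  have := (pvExt_bounds r (p * 10 + d) d v (by positivity) (by omega) he).1
  have hpow : (0:Int) < 10 ^ r := by positivity
  calc p * 10 ^ (r + 1) + 10 ^ r = (p * 10 + 1) * 10 ^ r := by ring
    _ ≤ (p * 10 + d) * 10 ^ r := by nlinarith
    _ ≤ v := this

theorem pvExt_snoc (r : Nat) :
    ∀ (p lo v : Int), 0 ≤ lo →
      (pvExt (r + 1) p lo v ↔
        match r with
        | 0 => lo ≤ v % 10 ∧ v / 10 = p
        | r' + 1 => pvExt (r' + 1) p lo (v / 10) ∧ (v / 10) % 10 ≤ v % 10) := by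
  induction r with
  | zero =>
    intro p lo v hlo
    simp only [pvExt]
    constructor
    · rintro ⟨d, hd1, hd2, he⟩
      have hd0 : 0 ≤ d := le_trans hlo hd1
      subst he; constructor <;> omega
    · rintro ⟨h1, h2⟩
      refine ⟨v % 10, h1, Int.emod_lt_of_pos v (by norm_num), ?_⟩
      omega
  | succ r' ih =>
    intro p lo v hlo
    constructor
    · rintro ⟨d, hd1, hd2, he⟩
      have hd0 : 0 ≤ d := le_trans hlo hd1
      have := (ih (p * 10 + d) d v hd0).mp he
      cases r' with
      | zero =>
        obtain ⟨h1, h2⟩ := this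
        refine ⟨⟨d, hd1, hd2, ?_⟩, ?_⟩
        · simp only [pvExt]; omega
        · omega
      | succ r'' =>
        obtain ⟨h1, h2⟩ := this
        exact ⟨⟨d, hd1, hd2, h1⟩, h2⟩
    · intro h
      cases r' with
      | zero =>
        obtain ⟨⟨d, hd1, hd2, he⟩, h2⟩ := h
        have hd0 : 0 ≤ d := le_trans hlo hd1
        simp only [pvExt] at he
        refine ⟨d, hd1, hd2, (ih (p * 10 + d) d v hd0).mpr ?_⟩
        exact ⟨by omega, by omega⟩
      | succ r'' =>
        obtain ⟨⟨d, hd1, hd2, he⟩, h2⟩ := h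
        have hd0 : 0 ≤ d := le_trans hlo hd1
        exact ⟨d, hd1, hd2, (ih (p * 10 + d) d v hd0).mpr ⟨he, h2⟩⟩

theorem pvTidy_ext (r : Nat) :
    ∀ v : Int, 10 ^ r ≤ v → v < 10 ^ (r + 1) →
      (gen_all_check v 9 true = true ↔ pvExt (r + 1) 0 1 v) := by
  induction r with
  | zero =>
    intro v h1 h2
    simp only [pow_zero] at h1 h2
    have hm : v % 10 = v := Int.emod_eq_of_lt (by omega) h2
    have hd : v / 10 = 0 := Int.ediv_eq_zero_of_lt (by omega) h2
    rw [pvCheck_unfold_pos v 9 (by omega), hm, hd, pvCheck_zero]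
    simp only [pvExt]
    constructor
    · intro h; exact ⟨v, by omega, h2, by omega⟩
    · rintro ⟨d, hd1, hd2, he⟩; simp; omega
  | succ r ih =>
    intro v h1 h2
    have hP : (1:Int) ≤ 10 ^ r := one_le_pow₀ (by norm_num)
    have hv10 : 10 ≤ v := by
      calc (10:Int) = 10 * 1 := by ring
        _ ≤ 10 * 10 ^ r := by nlinarith
        _ = 10 ^ (r + 1) := by ring
        _ ≤ v := h1
    have hq1 : 10 ^ r ≤ v / 10 := by
      rw [Int.le_ediv_iff_mul_le (by norm_num)]
      calc 10 ^ r * 10 = 10 ^ (r + 1) := by ring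
        _ ≤ v := h1
    have hq2 : v / 10 < 10 ^ (r + 1) := by
      rw [Int.ediv_lt_iff_lt_mul (by norm_num)]
      calc v < 10 ^ (r + 2) := h2
        _ = 10 ^ (r + 1) * 10 := by ring
    have hqpos : 0 < v / 10 := lt_of_lt_of_le (by positivity) hq1
    rw [pvCheck_unfold_pos v 9 (by omega)]
    have hm9 : (v % 10 ≤ 9) := by omega
    rw [pvCheck_cap (v / 10) (v % 10) hqpos]
    rw [pvExt_snoc (r + 1) 0 1 v (by norm_num)]
    simp only [decide_eq_true_eq, Bool.and_eq_true]
    rw [ih (v / 10) hq1 hq2]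
    constructor
    · rintro ⟨-, h3, h4⟩; exact ⟨h4, h3⟩
    · rintro ⟨h4, h3⟩; exact ⟨by omega, h3, h4⟩

-- every positive integer lies in exactly one decade
theorem pvDecade (m : Nat) : ∀ v : Int, 1 ≤ v → v.toNat ≤ m →
    ∃ r : Nat, 10 ^ r ≤ v ∧ v < 10 ^ (r + 1) := by
  induction m with
  | zero => intro v h1 h2; omega
  | succ m ih =>
    intro v h1 h2
    by_cases hv : v < 10
    · exact ⟨0, by simpa using h1, by simpa using hv⟩
    · have hq1 : 1 ≤ v / 10 := by omega
      have hq2 : (v / 10).toNat ≤ m := by omega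
      obtain ⟨r, hr1, hr2⟩ := ih (v / 10) hq1 hq2
      refine ⟨r + 1, ?_, ?_⟩
      · calc (10:Int) ^ (r + 1) = 10 ^ r * 10 := by ring
          _ ≤ (v / 10) * 10 := by nlinarith
          _ ≤ v := by omega
      · have : v / 10 ≤ 10 ^ (r + 1) - 1 := by omega
        calc v ≤ (v / 10) * 10 + 9 := by omega
          _ ≤ (10 ^ (r + 1) - 1) * 10 + 9 := by nlinarith
          _ < 10 ^ (r + 2) := by ring_nf; nlinarith [one_le_pow₀ (show (1:Int) ≤ 10 by norm_num) (n := r)]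

theorem pvNd_nonneg (n : Int) : 0 ≤ gen_all_nd n := by
  rw [gen_all_nd]; split_ifs with h
  · have := pvNd_nonneg (PySem.Int.floordiv n 10); omega
  · omega
termination_by n.toNat
decreasing_by
  have h1 := pvFd n
  omega

theorem pvNd_ub (m : Nat) : ∀ n : Int, 0 < n → n.toNat ≤ m →
    n < 10 ^ (gen_all_nd n).toNat := by
  induction m with
  | zero => intro n h1 h2; omega
  | succ m ih =>
    intro n h1 h2
    rw [gen_all_nd, dif_pos h1, pvFd]
    by_cases hq : 0 < n / 10
    · have := ih (n / 10) hq (by omega)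
      have hnd := pvNd_nonneg (n / 10)
      have hcast : (gen_all_nd (n / 10) + 1).toNat = (gen_all_nd (n / 10)).toNat + 1 := by omega
      rw [hcast, pow_succ]
      have hdm : n ≤ (n / 10) * 10 + 9 := by omega
      nlinarith [hdm, this]
    · have hq0 : n / 10 = 0 := by omega
      have : n < 10 := by omega
      rw [hq0]
      simp [gen_all_nd]
      omega

-- with 10^r ≤ n, length r+1 is among the generated lengths
theorem pvNd_covers (n : Int) (r : Nat) (h : 10 ^ r ≤ n) :
    (r : Int) + 1 ≤ gen_all_nd n := by
  have h1 : (1:Int) ≤ 10 ^ r := one_le_pow₀ (by norm_num)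
  have hn : 0 < n := by omega
  have h2 := pvNd_ub n.toNat n hn (le_refl _)
  have hnd := pvNd_nonneg n
  -- 10^r ≤ n < 10^nd' implies r < nd'
  by_contra hc
  have hlt : (gen_all_nd n).toNat ≤ r := by omega
  have : (10:Int) ^ (gen_all_nd n).toNat ≤ 10 ^ r :=
    pow_le_pow_right₀ (by norm_num) hlt
  omega

-- membership characterisation of B's output
theorem pvAlt_mem (n v : Int) :
    v ∈ gen_all_alt n ↔ (1 ≤ v ∧ v ≤ n ∧ gen_all_check v 9 true = true) := by
  unfold gen_all_alt
  rw [PySem.List.foldl_append_eq_flatMap]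
  simp only [List.nil_append, List.mem_flatMap, PySem.List.mem_pyRange_one]
  constructor
  · rintro ⟨len, ⟨hl1, hl2⟩, hv⟩
    have hlen : len = ((len.toNat : Nat) : Int) := by omega
    rw [hlen] at hv
    rw [pvGen_mem] at hv
    obtain ⟨hvn, he⟩ := hv
    obtain ⟨r, hr⟩ : ∃ r : Nat, len.toNat = r + 1 := ⟨len.toNat - 1, by omega⟩
    rw [hr] at he
    have hb := pvExt_lb r 0 1 v (le_refl 0) (le_refl 1) he
    have hub := (pvExt_bounds (r + 1) 0 1 v (le_refl 0) (by norm_num) he).2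
    have h1 : (1:Int) ≤ 10 ^ r := one_le_pow₀ (by norm_num)
    refine ⟨by omega, hvn, ?_⟩
    rw [pvTidy_ext r v (by omega) (by simpa using hub)]
    exact he
  · rintro ⟨h1, h2, h3⟩
    obtain ⟨r, hr1, hr2⟩ := pvDecade v.toNat v h1 (le_refl _)
    have he := (pvTidy_ext r v hr1 hr2).mp h3
    refine ⟨((r : Nat) : Int) + 1, ⟨by omega, ?_⟩, ?_⟩
    · have := pvNd_covers n r (le_trans hr1 h2)
      omega
    · have : ((r:Int) + 1) = (((r + 1 : Nat) : Nat) : Int) := by push_cast; ring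
      rw [this, pvGen_mem]
      exact ⟨h2, he⟩

-- A's output is the filtered range
theorem pvA_eq_filter (n : Int) :
    gen_all n = (PySem.List.pyRange 1 (n + 1) 1).filter (fun i => gen_all_check i 9 true) := by
  unfold gen_all
  rw [PySem.List.foldl_append_if_eq_filter]
  simp

-- B's output is strictly increasing
theorem pvGen_pairwise (n : Int) (r : Nat) :
    ∀ (p lo : Int), 0 ≤ p → 0 ≤ lo →
      (gen_all_gen n p lo (r : Int)).Pairwise (· < ·) := by
  induction r with
  | zero =>
    intro p lo hp hlo
    rw [gen_all_gen]
    simp only [show ((0:Nat):Int) < 1 by norm_num, if_true]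
    split_ifs <;> simp
  | succ r ih =>
    intro p lo hp hlo
    rw [gen_all_gen]
    have hlt : ¬ ((r + 1 : Nat) : Int) < 1 := by push_cast; omega
    rw [if_neg hlt, PySem.List.foldl_append_eq_flatMap]
    have hcast : ((r + 1 : Nat) : Int) - 1 = (r : Int) := by push_cast; ring
    simp only [hcast, List.nil_append]
    rw [List.pairwise_flatMap]
    refine ⟨?_, ?_⟩
    · intro d hd
      rw [PySem.List.mem_pyRange_one] at hd
      exact ih (p * 10 + d) d (by omega) (by omega)
    · have hpr := PySem.List.pairwise_lt_pyRange_one lo 10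
      refine hpr.imp_of_mem ?_
      intro d1 d2 hd1 hd2 hlt' x hx y hy
      rw [PySem.List.mem_pyRange_one] at hd1 hd2
      rw [pvGen_mem] at hx hy
      have hx2 := (pvExt_bounds r (p * 10 + d1) d1 x (by omega) (by omega) hx.2).2
      have hy1 := (pvExt_bounds r (p * 10 + d2) d2 y (by omega) (by omega) hy.2).1
      have hmono : (p * 10 + d1 + 1) * 10 ^ r ≤ (p * 10 + d2) * 10 ^ r := by
        have : (0:Int) < 10 ^ r := by positivity
        nlinarith
      omega

theorem pvAlt_pairwise (n : Int) : (gen_all_alt n).Pairwise (· < ·) := by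
  unfold gen_all_alt
  rw [PySem.List.foldl_append_eq_flatMap]
  simp only [List.nil_append]
  rw [List.pairwise_flatMap]
  refine ⟨?_, ?_⟩
  · intro len hlen
    rw [PySem.List.mem_pyRange_one] at hlen
    have : len = ((len.toNat : Nat) : Int) := by omega
    rw [this]
    exact pvGen_pairwise n len.toNat 0 1 (le_refl 0) (by norm_num)
  · have hpr := PySem.List.pairwise_lt_pyRange_one 1 (gen_all_nd n + 1)
    refine hpr.imp_of_mem ?_
    intro l1 l2 hl1 hl2 hlt x hx y hy
    rw [PySem.List.mem_pyRange_one] at hl1 hl2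
    have e1 : l1 = ((l1.toNat : Nat) : Int) := by omega
    have e2 : l2 = ((l2.toNat : Nat) : Int) := by omega
    rw [e1, pvGen_mem] at hx
    rw [e2, pvGen_mem] at hy
    obtain ⟨r1, hr1⟩ : ∃ r : Nat, l1.toNat = r + 1 := ⟨l1.toNat - 1, by omega⟩
    obtain ⟨r2, hr2⟩ : ∃ r : Nat, l2.toNat = r + 1 := ⟨l2.toNat - 1, by omega⟩
    rw [hr1] at hx; rw [hr2] at hy
    have hxub := (pvExt_bounds (r1 + 1) 0 1 x (le_refl 0) (by norm_num) hx.2).2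
    have hylb := pvExt_lb r2 0 1 y (le_refl 0) (le_refl 1) hy.2
    have hr12 : r1 + 1 ≤ r2 := by omega
    have hmono : (10:Int) ^ (r1 + 1) ≤ 10 ^ r2 :=
      pow_le_pow_right₀ (by norm_num) hr12
    simp only [one_mul, zero_mul, zero_add] at hxub hylb
    omega

-- two strictly increasing lists with the same members are equal
theorem pvEq_of_pairwise_lt (l1 l2 : List Int)
    (h1 : l1.Pairwise (· < ·)) (h2 : l2.Pairwise (· < ·))
    (hm : ∀ x, x ∈ l1 ↔ x ∈ l2) : l1 = l2 := by
  have hn1 : l1.Nodup := h1.imp (fun h => ne_of_lt h)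
  have hn2 : l2.Nodup := h2.imp (fun h => ne_of_lt h)
  have hp : l1.Perm l2 := (List.perm_ext_iff_of_nodup hn1 hn2).mpr hm
  exact List.eq_of_perm_of_sorted (fun a b _ _ ha hb => by omega) h1 h2 hp

-- ===== VERDICT (by name: the statement is the Claim_ definition above) =====
theorem gen_all_spec : Claim_equal_gen_all := by
  intro n _
  unfold Spec_gen_all
  rw [pvA_eq_filter]
  apply pvEq_of_pairwise_lt
  · exact (PySem.List.pairwise_lt_pyRange_one 1 (n + 1)).filter _
  · exact pvAlt_pairwise n
  · intro x
    rw [List.mem_filter, PySem.List.mem_pyRange_one, pvAlt_mem]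
    constructor
    · rintro ⟨⟨ha, hb⟩, hc⟩; exact ⟨ha, by omega, by simpa using hc⟩
    · rintro ⟨ha, hb, hc⟩; exact ⟨⟨ha, by omega⟩, by simpa using hc⟩
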